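-- pv_equiv track=rewrite | github.com/Zeffut/ChessBot | main.py | board_state_to_fen
-- ===== SOURCE A (Python) =====
-- def board_state_to_fen(board_state, active_color):
--     """
--     Convertit l'état de l'échiquier en notation FEN.
--     """
--     piece_to_fen = {
--         "roi": "k", "reine": "q", "tour": "r", "fou": "b", "cavalier": "n", "pion": "p"
--     }
--     fen_rows = []
--     for row in board_state:
--         empty_count = 0
--         fen_row = ""
--         for square in row:
--             if square == "empty":
--                 empty_count += 1
--             else:
--                 if empty_count > 0:
--                     fen_row += str(empty_count)
--                     empty_count = 0
--                 # Convertir les noms des pièces en notation FEN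
--                 piece = square[:-1]  # Nom de la pièce
--                 color = square[-1]  # Couleur (B ou N)
--                 fen_piece = piece_to_fen.get(piece.lower(), "?")  # Récupérer le caractère FEN
--                 if color == "B":
--                     fen_row += fen_piece.upper()  # Pièces blanches en majuscules
--                 else:
--                     fen_row += fen_piece.lower()  # Pièces noires en minuscules
--         if empty_count > 0:
--             fen_row += str(empty_count)
--         fen_rows.append(fen_row)
--     active_color = active_color  # Déterminer la couleur active
--     fen = "/".join(fen_rows) + f" {active_color} - - 0 1"  # Ajout de la couleur active
--     return fen
-- ===== SOURCE B (Python) =====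
-- def board_state_to_fen(board_state, active_color):
--     """
--     Convertit l'état de l'échiquier en notation FEN.
--     (map-then-run-length-compress pipeline)
--     """
--     piece_to_fen = {
--         "roi": "k", "reine": "q", "tour": "r", "fou": "b", "cavalier": "n", "pion": "p"
--     }
--
--     def cell(square):
--         # one square -> None (empty) or its cased FEN character
--         if square == "empty":
--             return None
--         fen = piece_to_fen.get(square[:-1].lower(), "?")
--         return fen.upper() if square[-1] == "B" else fen.lower()
--
--     def compress(cells):
--         # collapse maximal runs: a run of None -> its length, a run of chars -> the chars
--         parts = []
--         i = 0
--         while i < len(cells):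
--             j = i
--             while j < len(cells) and cells[j] == cells[i]:
--                 j += 1
--             parts.append(str(j - i) if cells[i] is None else cells[i] * (j - i))
--             i = j
--         return "".join(parts)
--
--     body = "/".join(compress([cell(sq) for sq in row]) for row in board_state)
--     return body + f" {active_color} - - 0 1"
-- ===== Notes on version B (the rewrite author's own statement) =====
-- stated objective: alternative
-- what changed: Replaces A's inline empty-counter/flush state machine with a two-stage pipeline: map every square to None-or-FEN-char, then run-length-compress the row (runs of None become their length).
import Mathlib
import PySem

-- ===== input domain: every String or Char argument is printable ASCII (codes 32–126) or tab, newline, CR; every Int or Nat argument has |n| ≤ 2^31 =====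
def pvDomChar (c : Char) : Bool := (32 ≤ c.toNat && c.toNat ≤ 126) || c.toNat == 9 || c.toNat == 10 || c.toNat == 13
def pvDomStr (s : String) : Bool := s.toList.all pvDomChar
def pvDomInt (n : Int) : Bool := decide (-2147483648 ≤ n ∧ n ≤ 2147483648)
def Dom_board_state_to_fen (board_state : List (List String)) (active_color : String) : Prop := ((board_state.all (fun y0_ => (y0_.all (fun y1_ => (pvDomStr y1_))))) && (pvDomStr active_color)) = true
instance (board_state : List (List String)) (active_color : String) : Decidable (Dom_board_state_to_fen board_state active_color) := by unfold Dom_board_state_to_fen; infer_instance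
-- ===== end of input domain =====

-- B replaces A's inline empty-counter/flush loop by a map-then-run-length-compress pipeline (alternative decomposition, same cost).


-- ===== PORT A =====
-- the dict literal piece_to_fen
def pieceToFenA : PySem.Dict (List Char) (List Char) :=
  PySem.Dict.mk [("roi".toList, "k".toList), ("reine".toList, "q".toList), ("tour".toList, "r".toList),
                 ("fou".toList, "b".toList), ("cavalier".toList, "n".toList), ("pion".toList, "p".toList)]

-- the body of the inner for-loop: state = (empty_count, fen_row)
def stepA (s : Int × List Char) (square : String) : Int × List Char :=
  if square == "empty" then (s.1 + 1, s.2)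
  else
    let acc := if s.1 > 0 then s.2 ++ PySem.Int.toChars s.1 else s.2
    let piece := PySem.Chars.slice square.toList none (some (-1))     -- square[:-1]
    let color := PySem.Chars.pyGet? square.toList (-1)                -- square[-1]; none = IndexError (excluded by Pre_)
    let fen_piece := pieceToFenA.getD (PySem.Chars.lower piece) "?".toList
    if color == some 'B' then (0, acc ++ PySem.Chars.upper fen_piece)
    else (0, acc ++ PySem.Chars.lower fen_piece)

-- one row of A's outer loop, including the final empty_count flush
def fenRowA (row : List String) : List Char :=
  let st := row.foldl stepA (0, [])
  if st.1 > 0 then st.2 ++ PySem.Int.toChars st.1 else st.2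

def board_state_to_fen (board_state : List (List String)) (active_color : String) : String :=
  String.ofList (PySem.Chars.join "/".toList (board_state.map fenRowA) ++ (' ' :: active_color.toList) ++ " - - 0 1".toList)

-- ===== PORT B =====
def pieceToFenB : PySem.Dict (List Char) (List Char) :=
  PySem.Dict.mk [("roi".toList, "k".toList), ("reine".toList, "q".toList), ("tour".toList, "r".toList),
                 ("fou".toList, "b".toList), ("cavalier".toList, "n".toList), ("pion".toList, "p".toList)]

-- cell(square): None for empty, else the cased FEN character (a 1-char Python string = List Char)
def cellB (square : String) : Option (List Char) :=
  if square == "empty" then none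
  else
    let fen := pieceToFenB.getD (PySem.Chars.lower (PySem.Chars.slice square.toList none (some (-1)))) "?".toList
    if PySem.Chars.pyGet? square.toList (-1) == some 'B' then some (PySem.Chars.upper fen)
    else some (PySem.Chars.lower fen)

-- compress(cells): the while-loop scanning maximal runs, as structural recursion on the run decomposition
-- (cells[i:j] = the leading run = takeWhile, the rest = dropWhile; str repetition c*(j-i) is flatten∘replicate)
def compressB : List (Option (List Char)) → List Char
  | [] => []
  | c :: rest =>
    let run := rest.takeWhile (· == c)
    let rest' := rest.dropWhile (· == c)
    (match c with
     | none => PySem.Int.toChars (1 + (run.length : Int))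
     | some cs => (List.replicate (1 + run.length) cs).flatten) ++ compressB rest'
  termination_by cells => cells.length
  decreasing_by
    simp only [List.length_cons]
    exact Nat.lt_succ_of_le (List.length_dropWhile_le _ _)

def board_state_to_fen_alt (board_state : List (List String)) (active_color : String) : String :=
  String.ofList (PySem.Chars.join "/".toList (board_state.map (fun row => compressB (row.map cellB))) ++ (' ' :: active_color.toList) ++ " - - 0 1".toList)

-- ===== PRECONDITION & SPEC =====
-- Pre_ excludes boards containing an empty-string square "": there Python A (and B) raise IndexError on square[-1].
def Pre_board_state_to_fen (board_state : List (List String)) (active_color : String) : Prop :=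
  ∀ row ∈ board_state, ∀ sq ∈ row, sq ≠ ""
instance (board_state : List (List String)) (active_color : String) : Decidable (Pre_board_state_to_fen board_state active_color) := by unfold Pre_board_state_to_fen; infer_instance
def pvWitness_board_state_to_fen : List (List String) × String :=
  ([["roiB", "empty", "empty", "pionN"], ["empty", "empty"], ["fooB", "reineN"]], "w")
def Spec_board_state_to_fen (board_state : List (List String)) (active_color : String) (out : String) : Prop := out = board_state_to_fen_alt board_state active_color
instance (board_state : List (List String)) (active_color : String) (out : String) : Decidable (Spec_board_state_to_fen board_state active_color out) := by unfold Spec_board_state_to_fen; infer_instance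

-- ===== CLAIM (what is proved, stated in full; the proofs are below) =====
def Claim_equal_board_state_to_fen : Prop := ∀ (board_state : List (List String)) (active_color : String), Dom_board_state_to_fen board_state active_color → Pre_board_state_to_fen board_state active_color → Spec_board_state_to_fen board_state active_color (board_state_to_fen board_state active_color)

-- ===== LEMMAS AND PROOFS =====

-- common abstract description of one row: pending empty count ++ compressed remainder
def rowSpec : Int → List (Option (List Char)) → List Char
  | ec, [] => if ec > 0 then PySem.Int.toChars ec else []
  | ec, none :: rest => rowSpec (ec + 1) rest
  | ec, some cs :: rest => (if ec > 0 then PySem.Int.toChars ec else []) ++ cs ++ rowSpec 0 rest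

theorem foldA_spec (row : List String) : ∀ (ec : Int) (acc : List Char),
    (let st := row.foldl stepA (ec, acc);
     if st.1 > 0 then st.2 ++ PySem.Int.toChars st.1 else st.2) = acc ++ rowSpec ec (row.map cellB) := by
  induction row with
  | nil =>
    intro ec acc
    simp only [List.foldl_nil, List.map_nil, rowSpec]
    split_ifs <;> simp
  | cons sq rest ih =>
    intro ec acc
    by_cases hsq : sq == "empty"
    · have h1 : cellB sq = none := by simp [cellB, hsq]
      simp only [List.foldl_cons, List.map_cons, h1, stepA, hsq, if_pos, rowSpec]
      exact ih (ec + 1) acc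
    · have hstep : stepA (ec, acc) sq =
        (0, (if ec > 0 then acc ++ PySem.Int.toChars ec else acc) ++
             (cellB sq).getD []) := by
        simp only [stepA, hsq, if_neg, Bool.false_eq_true, not_false_iff, cellB, pieceToFenA, pieceToFenB]
        split <;> simp
      have hcell : ∃ cs, cellB sq = some cs := by
        simp only [cellB, hsq, if_neg, Bool.false_eq_true, not_false_iff]
        split <;> exact ⟨_, rfl⟩
      obtain ⟨cs, hcs⟩ := hcell
      simp only [List.foldl_cons, List.map_cons, hcs, hstep, rowSpec]
      rw [ih 0 _]
      simp only [Option.getD_some]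
      split_ifs <;> simp
-- the A side: fenRowA computes rowSpec 0
theorem fenRowA_eq (row : List String) : fenRowA row = rowSpec 0 (row.map cellB) := by
  have := foldA_spec row 0 []
  simpa [fenRowA] using this

-- rowSpec absorbs a leading all-None run into the pending count
theorem rowSpec_none_run : ∀ (run : List (Option (List Char))) (rest : List (Option (List Char))) (ec : Int),
    (∀ x ∈ run, x = none) → rowSpec ec (run ++ rest) = rowSpec (ec + run.length) rest := by
  intro run
  induction run with
  | nil => intro rest ec _; simp
  | cons a t ih =>
    intro rest ec h
    have ha : a = none := h a (by simp)
    subst ha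
    simp only [List.cons_append, rowSpec]
    rw [ih rest (ec + 1) (fun x hx => h x (by simp [hx]))]
    simp only [List.length_cons]
    congr 1
    push_cast
    ring

-- with a positive pending count and a remainder not starting with None, rowSpec emits the count
theorem rowSpec_flush (ec : Int) (rest : List (Option (List Char))) (hec : 0 < ec)
    (hrest : rest = [] ∨ ∃ cs t, rest = some cs :: t) :
    rowSpec ec rest = PySem.Int.toChars ec ++ rowSpec 0 rest := by
  rcases hrest with h | ⟨cs, t, h⟩ <;> subst h <;>
    simp [rowSpec, hec, List.append_assoc]

-- rowSpec emits a leading run of identical piece characters verbatim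
theorem rowSpec_piece_run : ∀ (run : List (Option (List Char))) (rest : List (Option (List Char))) (cs : List Char),
    (∀ x ∈ run, x = some cs) → rowSpec 0 (run ++ rest) = (List.replicate run.length cs).flatten ++ rowSpec 0 rest := by
  intro run
  induction run with
  | nil => intro rest cs _; simp
  | cons a t ih =>
    intro rest cs h
    have ha : a = some cs := h a (by simp)
    subst ha
    simp only [List.cons_append, rowSpec, List.length_cons, List.replicate_succ, List.flatten_cons]
    rw [ih rest cs (fun x hx => h x (by simp [hx]))]
    simp

theorem dropWhile_shape (c : Option (List Char)) (rest : List (Option (List Char))) :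
    rest.dropWhile (· == c) = [] ∨
      ∃ h t, rest.dropWhile (· == c) = h :: t ∧ ¬ (h == c) = true := by
  cases hd : rest.dropWhile (· == c) with
  | nil => exact Or.inl rfl
  | cons h t =>
    refine Or.inr ⟨h, t, rfl, ?_⟩
    have := List.head_dropWhile_not (p := (· == c)) (l := rest) (by simp [hd])
    simpa [hd] using this

-- the B side: compressB computes rowSpec 0
theorem compressB_eq_rowSpec : ∀ (n : Nat) (cells : List (Option (List Char))), cells.length ≤ n →
    compressB cells = rowSpec 0 cells := by
  intro n
  induction n with
  | zero =>
    intro cells h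
    have : cells = [] := List.eq_nil_of_length_eq_zero (Nat.le_zero.mp h)
    subst this
    simp [compressB, rowSpec]
  | succ m ih =>
    intro cells h
    cases cells with
    | nil => simp [compressB, rowSpec]
    | cons c rest =>
      have hsplit : rest.takeWhile (· == c) ++ rest.dropWhile (· == c) = rest :=
        List.takeWhile_append_dropWhile
      have hlen : (rest.dropWhile (· == c)).length ≤ m := by
        have := List.length_dropWhile_le (p := (· == c)) (l := rest)
        simp only [List.length_cons] at h
        omega
      have hih := ih _ hlen
      have hshape := dropWhile_shape c rest
      cases c with
      | none =>
        have hrun : ∀ x ∈ rest.takeWhile (· == (none : Option (List Char))), x = none := by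
          intro x hx
          have := List.takeWhile_subset (p := (· == (none : Option (List Char)))) hx
          have hpx := List.mem_takeWhile_imp hx
          simpa using hpx
        have hshape' : rest.dropWhile (· == (none : Option (List Char))) = [] ∨
            ∃ cs t, rest.dropWhile (· == (none : Option (List Char))) = some cs :: t := by
          rcases hshape with h0 | ⟨hh, tt, hht, hne⟩
          · exact Or.inl h0
          · cases hh with
            | none => simp at hne
            | some cs => exact Or.inr ⟨cs, tt, hht⟩
        rw [compressB, hih]
        show PySem.Int.toChars (1 + ((rest.takeWhile (· == (none : Option (List Char)))).length : Int)) ++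
            rowSpec 0 (rest.dropWhile (· == (none : Option (List Char)))) = rowSpec 0 (none :: rest)
        conv_rhs => rw [← hsplit]
        show _ = rowSpec 0 (none :: (rest.takeWhile (· == (none : Option (List Char))) ++ rest.dropWhile (· == (none : Option (List Char)))))
        rw [show rowSpec 0 (none :: (rest.takeWhile (· == (none : Option (List Char))) ++ rest.dropWhile (· == (none : Option (List Char))))) =
              rowSpec 1 (rest.takeWhile (· == (none : Option (List Char))) ++ rest.dropWhile (· == (none : Option (List Char)))) from rfl]
        rw [rowSpec_none_run _ _ 1 hrun]
        exact (rowSpec_flush _ _ (by omega) hshape').symm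
      | some cs =>
        have hrun : ∀ x ∈ rest.takeWhile (· == some cs), x = some cs := by
          intro x hx
          have hpx := List.mem_takeWhile_imp hx
          simpa using hpx
        rw [compressB, hih]
        show (List.replicate (1 + (rest.takeWhile (· == some cs)).length) cs).flatten ++
            rowSpec 0 (rest.dropWhile (· == some cs)) = rowSpec 0 (some cs :: rest)
        conv_rhs => rw [← hsplit]
        show _ = rowSpec 0 (some cs :: (rest.takeWhile (· == some cs) ++ rest.dropWhile (· == some cs)))
        rw [show rowSpec 0 (some cs :: (rest.takeWhile (· == some cs) ++ rest.dropWhile (· == some cs))) =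
              cs ++ rowSpec 0 (rest.takeWhile (· == some cs) ++ rest.dropWhile (· == some cs)) by simp [rowSpec]]
        rw [rowSpec_piece_run _ _ cs hrun]
        rw [Nat.add_comm 1, List.replicate_succ, List.flatten_cons]
        simp [List.append_assoc]

theorem row_eq (row : List String) : fenRowA row = compressB (row.map cellB) := by
  rw [fenRowA_eq, compressB_eq_rowSpec (row.map cellB).length _ le_rfl]

-- ===== VERDICT (by name: the statement is the Claim_ definition above) =====
theorem board_state_to_fen_spec : Claim_equal_board_state_to_fen := by
  intro board_state active_color _dom _pre
  show board_state_to_fen board_state active_color = board_state_to_fen_alt board_state active_color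
  unfold board_state_to_fen board_state_to_fen_alt
  rw [List.map_congr_left (fun row (_ : row ∈ board_state) => row_eq row)]
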